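-- pv_equiv track=rewrite | github.com/dcschenc/myleetcode | 1436-get-watched-videos-by-your-friends/1436-get-watched-videos-by-your-friends.py | watchedVideosByFriends
-- ===== SOURCE A (Python) =====
-- from typing import List
--
-- from collections import deque, Counter
--
-- def watchedVideosByFriends(watchedVideos: List[List[str]], friends: List[List[int]], id: int, level: int) -> List[str]:
--     queue = deque()
--     queue.append(id)
--     cur_level = 0
--     movies = Counter()
--     visited = set()
--     while queue:
--         for i in range(len(queue)):
--             node = queue.popleft()
--             if node in visited:
--               continue
--             visited.add(node)
--             if cur_level != level:
--                 for nb in friends[node]: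
--                     queue.append(nb)
--             else:
--                 for mv in watchedVideos[node]:
--                     movies[mv] += 1
--         cur_level += 1
--         if cur_level > level:
--             break
--     sorted_items = sorted(movies.items(), key=lambda x: (x[1], x[0]))
--     return [item[0] for item in sorted_items]
-- ===== SOURCE B (Python) =====
-- from typing import List
--
--
-- def watchedVideosByFriends(watchedVideos: List[List[str]], friends: List[List[int]], id: int, level: int) -> List[str]:
--     # distance-map relaxation: rescan every known node each round, no queue/frontier
--     dist = {id: 0}
--     d = 0
--     changed = True
--     while d < level and changed:
--         changed = False
--         for u, du in list(dist.items()):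
--             for nb in friends[u]:
--                 if nb not in dist:
--                     dist[nb] = du + 1
--                     changed = True
--         d += 1
--     videos = [mv for u, du in dist.items() if du == level for mv in watchedVideos[u]]
--     videos.sort()
--     # run-length encode the sorted list into (count, name) pairs, then sort the pairs
--     runs = []
--     for v in videos:
--         if runs and runs[-1][1] == v:
--             runs[-1] = (runs[-1][0] + 1, v)
--         else:
--             runs.append((1, v))
--     runs.sort()
--     return [name for _, name in runs]
-- ===== Notes on version B (the rewrite author's own statement) =====
-- stated objective: alternative
-- what changed: Replaces A's BFS (a deque consumed level-by-level with visited checked on pop, plus a Counter sorted by (count,name)) by a distance-map relaxation that rescans every known node each round inserting unseen neighbours at distance d+1 (no queue, no frontier, no visited set), and replaces the Counter by sorting the flat video list and run-length-encoding it into (count,name) pairs that are then sorted.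
import Mathlib
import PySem

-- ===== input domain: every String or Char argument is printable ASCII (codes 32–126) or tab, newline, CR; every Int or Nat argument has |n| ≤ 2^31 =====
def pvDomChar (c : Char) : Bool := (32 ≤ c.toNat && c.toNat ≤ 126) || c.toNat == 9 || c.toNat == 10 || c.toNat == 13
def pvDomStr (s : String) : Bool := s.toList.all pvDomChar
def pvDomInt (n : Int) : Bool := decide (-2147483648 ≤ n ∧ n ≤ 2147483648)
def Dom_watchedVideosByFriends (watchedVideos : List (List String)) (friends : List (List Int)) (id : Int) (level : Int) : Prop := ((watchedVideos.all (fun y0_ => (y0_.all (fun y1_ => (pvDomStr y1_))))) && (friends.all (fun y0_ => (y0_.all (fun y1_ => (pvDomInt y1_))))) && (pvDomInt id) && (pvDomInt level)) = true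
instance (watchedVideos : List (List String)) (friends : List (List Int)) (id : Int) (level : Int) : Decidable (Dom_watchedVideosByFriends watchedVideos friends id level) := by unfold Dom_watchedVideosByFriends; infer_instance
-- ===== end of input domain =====

-- B replaces A's BFS (deque consumed level-by-level, visited checked on pop, Counter sorted by
-- (count, name)) by a distance-map relaxation that rescans every known node each round, and by
-- sort-and-run-length-encode counting instead of a Counter; same value on every input A accepts.

-- shared accessors: friends[node] and watchedVideos[node] (Python indexing; in range under Pre_)
def pvNbr (friends : List (List Int)) (u : Int) : List Int := PySem.List.pyGetD friends u []
def pvWat (watchedVideos : List (List String)) (u : Int) : List String := PySem.List.pyGetD watchedVideos u []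

-- ===== PORT A =====
-- `for mv in vids: movies[mv] += 1` (Counter increment)
def pvCountVids (mov : PySem.Dict String Int) (vids : List String) : PySem.Dict String Int :=
  vids.foldl (fun d mv => d.modify mv 0 (· + 1)) mov

-- body of A's inner `for i in range(len(queue))` loop; state = (appended queue, visited, movies)
def aStep (watchedVideos : List (List String)) (friends : List (List Int)) (cur level : Int)
    (st : List Int × PySem.Set Int × PySem.Dict String Int) (node : Int) :
    List Int × PySem.Set Int × PySem.Dict String Int :=
  if st.2.1.contains node then st
  else
    let vis' := st.2.1.add node
    if cur ≠ level then (st.1 ++ pvNbr friends node, vis', st.2.2)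
    else (st.1, vis', pvCountVids st.2.2 (pvWat watchedVideos node))

-- A's `while queue:` loop; fuel counts the iterations the `cur_level > level` break allows
def aLoop (watchedVideos : List (List String)) (friends : List (List Int)) (level : Int) :
    Nat → Int → List Int → PySem.Set Int → PySem.Dict String Int → PySem.Dict String Int
  | 0, _, _, _, mov => mov
  | fuel + 1, cur, q, vis, mov =>
    if q = [] then mov
    else
      let st := q.foldl (aStep watchedVideos friends cur level) ([], vis, mov)
      if cur + 1 > level then st.2.2
      else aLoop watchedVideos friends level fuel (cur + 1) st.1 st.2.1 st.2.2

def watchedVideosByFriends (watchedVideos : List (List String)) (friends : List (List Int)) (id : Int) (level : Int) : List String :=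
  let movies := aLoop watchedVideos friends level (max level 0 + 1).toNat 0 [id] PySem.Set.empty PySem.Dict.empty
  (PySem.List.sorted2 movies.items (fun x => x.2) (fun x => x.1)).map (fun x => x.1)

-- ===== PORT B =====
-- body of B's `for u, du in list(dist.items())` loop; state = (dist, changed)
def bRelax (friends : List (List Int)) (st : PySem.Dict Int Int × Bool) (p : Int × Int) :
    PySem.Dict Int Int × Bool :=
  (pvNbr friends p.1).foldl
    (fun st nb => if st.1.contains nb then st else (st.1.insert nb (p.2 + 1), true)) st

-- one round: `changed = False; for u, du in list(dist.items()): …`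
def bRound (friends : List (List Int)) (dist : PySem.Dict Int Int) : PySem.Dict Int Int × Bool :=
  dist.items.foldl (bRelax friends) (dist, false)

-- B's `while d < level and changed:` loop; d increments each round so level.toNat fuel is exact
def bLoop (friends : List (List Int)) (level : Int) :
    Nat → Int → PySem.Dict Int Int → PySem.Dict Int Int
  | 0, _, dist => dist
  | n + 1, d, dist =>
    if d < level then
      let r := bRound friends dist
      if r.2 then bLoop friends level n (d + 1) r.1 else r.1
    else dist

-- `if runs and runs[-1][1] == v: runs[-1] = (…+1, v) else: runs.append((1, v))`, with the list
-- kept reversed (head = Python's last element); B reverses it back before sorting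
def bRunStep (acc : List (Int × String)) (v : String) : List (Int × String) :=
  match acc with
  | (c, y) :: rest => if y = v then (c + 1, y) :: rest else (1, v) :: (c, y) :: rest
  | [] => [(1, v)]

def watchedVideosByFriends_alt (watchedVideos : List (List String)) (friends : List (List Int)) (id : Int) (level : Int) : List String :=
  let dist := bLoop friends level level.toNat 0 (PySem.Dict.empty.insert id 0)
  let videos := dist.items.flatMap (fun p => if p.2 = level then pvWat watchedVideos p.1 else [])
  let runs := ((PySem.List.sorted videos (fun x => x) false).foldl bRunStep []).reverse
  (PySem.List.sorted2 runs (fun x => x.1) (fun x => x.2)).map (fun x => x.2)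

-- ===== PRECONDITION & SPEC =====

-- the sequence of first occurrences of q not already in vis (the nodes one BFS level discovers)
def newOf (vis : List Int) : List Int → List Int
  | [] => []
  | x :: q => if x ∈ vis then newOf vis q else x :: newOf (vis ++ [x]) q

-- one BFS level of the input graph: (visited, frontier) → (visited', next frontier)
def pvStep (friends : List (List Int)) (p : List Int × List Int) : List Int × List Int :=
  (p.1 ++ newOf p.1 (p.2.flatMap (pvNbr friends)), newOf p.1 (p.2.flatMap (pvNbr friends)))

def pvIter (friends : List (List Int)) : Nat → (List Int × List Int) → List Int × List Int
  | 0, p => p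
  | n + 1, p => pvIter friends n (pvStep friends p)

abbrev pvIdxOk {α : Type} (l : List α) (i : Int) : Prop := -(l.length : Int) ≤ i ∧ i < l.length

-- Pre_ is exactly the inputs on which Python A returns: A raises IndexError precisely when a node
-- it actually dereferences is an out-of-range index — friends[u] for every u at BFS distance
-- < level from id, watchedVideos[u] for every u at distance exactly level (the frontier scan is
-- capped at 1 + the total number of friend entries, beyond which every frontier is empty).
def Pre_watchedVideosByFriends (watchedVideos : List (List String)) (friends : List (List Int)) (id : Int) (level : Int) : Prop :=
  if level < 0 then pvIdxOk friends id
  else if level = 0 then pvIdxOk watchedVideos id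
  else
    (∀ k < min level.toNat (1 + (friends.flatMap (fun r => r)).length),
        ∀ u ∈ (pvIter friends k ([id], [id])).2, pvIdxOk friends u) ∧
    (∀ u ∈ (pvIter friends (min level.toNat (1 + (friends.flatMap (fun r => r)).length)) ([id], [id])).2,
        pvIdxOk watchedVideos u)
instance (watchedVideos : List (List String)) (friends : List (List Int)) (id : Int) (level : Int) : Decidable (Pre_watchedVideosByFriends watchedVideos friends id level) := by unfold Pre_watchedVideosByFriends; infer_instance

def pvWitness_watchedVideosByFriends : List (List String) × List (List Int) × Int × Int :=
  ([["a"], ["b"]], [[1], [0]], 0, 1)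

def Spec_watchedVideosByFriends (watchedVideos : List (List String)) (friends : List (List Int)) (id : Int) (level : Int) (out : List String) : Prop := out = watchedVideosByFriends_alt watchedVideos friends id level
instance (watchedVideos : List (List String)) (friends : List (List Int)) (id : Int) (level : Int) (out : List String) : Decidable (Spec_watchedVideosByFriends watchedVideos friends id level out) := by unfold Spec_watchedVideosByFriends; infer_instance

-- ===== CLAIM (what is proved, stated in full; the proofs are below) =====
def Claim_equal_watchedVideosByFriends : Prop := ∀ (watchedVideos : List (List String)) (friends : List (List Int)) (id : Int) (level : Int), Dom_watchedVideosByFriends watchedVideos friends id level → Pre_watchedVideosByFriends watchedVideos friends id level → Spec_watchedVideosByFriends watchedVideos friends id level (watchedVideosByFriends watchedVideos friends id level)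

-- ===== LEMMAS AND PROOFS =====

-- ---------- newOf / pvIter facts ----------

theorem newOf_append (xs : List Int) : ∀ (vis ys : List Int),
    newOf vis (xs ++ ys) = newOf vis xs ++ newOf (vis ++ newOf vis xs) ys := by
  induction xs with
  | nil => intro vis ys; simp [newOf]
  | cons x xs ih =>
    intro vis ys
    by_cases hx : x ∈ vis
    · simp [newOf, hx, ih]
    · simp [newOf, hx, ih (vis ++ [x]) ys]

theorem mem_newOf : ∀ (q vis : List Int) (x : Int), x ∈ q → x ∈ vis ∨ x ∈ newOf vis q := by
  intro q
  induction q with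
  | nil => intro vis x hx; cases hx
  | cons y q ih =>
    intro vis x hx
    by_cases hy : y ∈ vis
    · rcases List.mem_cons.mp hx with rfl | hx
      · exact Or.inl hy
      · simpa [newOf, hy] using ih vis x hx
    · rcases List.mem_cons.mp hx with rfl | hx
      · exact Or.inr (by simp [newOf, hy])
      · rcases ih (vis ++ [y]) x hx with h | h
        · rcases List.mem_append.mp h with h | h
          · exact Or.inl h
          · exact Or.inr (by simp_all [newOf, hy])
        · exact Or.inr (by simp [newOf, hy, h])

theorem newOf_nodup_notmem : ∀ (q vis : List Int),
    (newOf vis q).Nodup ∧ ∀ x ∈ newOf vis q, x ∉ vis := by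
  intro q
  induction q with
  | nil => intro vis; simp [newOf]
  | cons y q ih =>
    intro vis
    by_cases hy : y ∈ vis
    · simpa [newOf, hy] using ih vis
    · obtain ⟨h1, h2⟩ := ih (vis ++ [y])
      refine ⟨?_, ?_⟩
      · simp only [newOf, hy, if_false]
        refine List.nodup_cons.mpr ⟨fun hmem => ?_, h1⟩
        exact h2 y hmem (by simp)
      · intro x hx
        simp only [newOf, hy, if_false, List.mem_cons] at hx
        rcases hx with rfl | hx
        · exact hy
        · intro hxv; exact h2 x hx (by simp [hxv])

theorem pvIter_nil (friends : List (List Int)) : ∀ (n : Nat) (vis : List Int),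
    (pvIter friends n (vis, [])).2 = [] := by
  intro n
  induction n with
  | zero => intro vis; rfl
  | succ n ih => intro vis; simpa [pvIter, pvStep, newOf] using ih vis

-- ---------- A's loop computes the level-`level` frontier's video list, counted ----------

theorem set_add_of_not_mem (s : PySem.Set Int) (x : Int) (h : x ∉ s) : s.add x = s ++ [x] := by
  simp [PySem.Set.add, PySem.Set.contains, h]

theorem pvCountVids_append (d : PySem.Dict String Int) (l1 l2 : List String) :
    pvCountVids d (l1 ++ l2) = pvCountVids (pvCountVids d l1) l2 := by
  simp [pvCountVids, List.foldl_append]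

theorem aRound_expand (w : List (List String)) (f : List (List Int)) (cur level : Int)
    (h : cur ≠ level) (q : List Int) : ∀ (vis acc : List Int) (mov : PySem.Dict String Int),
    q.foldl (aStep w f cur level) (acc, vis, mov)
      = (acc ++ (newOf vis q).flatMap (pvNbr f), vis ++ newOf vis q, mov) := by
  induction q with
  | nil => intro vis acc mov; simp [newOf]
  | cons node q ih =>
    intro vis acc mov
    by_cases hv : node ∈ vis
    · have : aStep w f cur level (acc, vis, mov) node = (acc, vis, mov) := by
        simp [aStep, hv]
      simp [List.foldl_cons, this, newOf, hv, ih vis acc mov]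
    · have : aStep w f cur level (acc, vis, mov) node
          = (acc ++ pvNbr f node, vis ++ [node], mov) := by
        simp only [aStep]
        rw [if_neg (by simp [hv])]
        simp [h, set_add_of_not_mem vis node hv]
      rw [List.foldl_cons, this, ih (vis ++ [node]) (acc ++ pvNbr f node) mov]
      simp [newOf, hv, List.append_assoc]

theorem aRound_count (w : List (List String)) (f : List (List Int)) (level : Int)
    (q : List Int) : ∀ (vis acc : List Int) (mov : PySem.Dict String Int),
    q.foldl (aStep w f level level) (acc, vis, mov)
      = (acc, vis ++ newOf vis q, pvCountVids mov ((newOf vis q).flatMap (pvWat w))) := by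
  induction q with
  | nil => intro vis acc mov; simp [newOf, pvCountVids]
  | cons node q ih =>
    intro vis acc mov
    by_cases hv : node ∈ vis
    · have : aStep w f level level (acc, vis, mov) node = (acc, vis, mov) := by
        simp [aStep, hv]
      simp [List.foldl_cons, this, newOf, hv, ih vis acc mov]
    · have : aStep w f level level (acc, vis, mov) node
          = (acc, vis ++ [node], pvCountVids mov (pvWat w node)) := by
        simp only [aStep]
        rw [if_neg (by simp [hv])]
        simp [set_add_of_not_mem vis node hv]
      rw [List.foldl_cons, this, ih (vis ++ [node]) acc (pvCountVids mov (pvWat w node))]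
      simp [newOf, hv, List.flatMap_cons, pvCountVids_append]

theorem counter_eq_pvCountVids (L : List String) :
    PySem.Dict.counter L = pvCountVids PySem.Dict.empty L := by
  rw [PySem.Dict.counter_eq_foldl]; rfl

theorem aLoop_eq (w : List (List String)) (f : List (List Int)) (level : Int) :
    ∀ (n : Nat) (cur : Int) (q vis : List Int), cur ≤ level → (level - cur).toNat = n →
    aLoop w f level (n + 1) cur q vis PySem.Dict.empty
      = PySem.Dict.counter ((pvIter f n (vis ++ newOf vis q, newOf vis q)).2.flatMap (pvWat w)) := by
  intro n
  induction n with
  | zero =>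
    intro cur q vis hle h0
    have hcur : cur = level := by omega
    subst hcur
    by_cases hq : q = []
    · subst hq
      simp [aLoop, pvIter, newOf, counter_eq_pvCountVids, pvCountVids]
    · rw [aLoop, if_neg hq]
      simp only
      rw [aRound_count w f cur q vis [] PySem.Dict.empty]
      rw [if_pos (by omega)]
      simp [pvIter, counter_eq_pvCountVids]
  | succ n ih =>
    intro cur q vis hle hn
    have hlt : cur < level := by omega
    by_cases hq : q = []
    · subst hq
      rw [aLoop, if_pos rfl]
      simp only [newOf, List.append_nil]
      rw [pvIter_nil]
      simp [counter_eq_pvCountVids, pvCountVids]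
    · rw [aLoop, if_neg hq]
      rw [aRound_expand w f cur level (by omega) q vis [] PySem.Dict.empty]
      rw [if_neg (by omega)]
      simp only [List.nil_append]
      rw [ih (cur + 1) ((newOf vis q).flatMap (pvNbr f)) (vis ++ newOf vis q) (by omega) (by omega)]
      rfl

-- ---------- B's loop: the dict holds each discovered node with its BFS distance ----------

theorem dict_mk_items (d : PySem.Dict Int Int) : PySem.Dict.mk d.items = d := rfl

theorem newOf_nil_of_subset : ∀ (l vis : List Int), (∀ x ∈ l, x ∈ vis) → newOf vis l = [] := by
  intro l
  induction l with
  | nil => intro vis _; rfl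
  | cons x l ih =>
    intro vis h
    have hx : x ∈ vis := h x (by simp)
    simp only [newOf, hx, if_true]
    exact ih vis fun y hy => h y (by simp [hy])

theorem bInner (dv : Int) :
    ∀ (l : List Int) (d0 : PySem.Dict Int Int) (ch : Bool),
    l.foldl (fun st nb => if st.1.contains nb then st else (st.1.insert nb (dv + 1), true)) (d0, ch)
      = (PySem.Dict.mk (d0.items ++ (newOf d0.keys l).map (fun u => (u, dv + 1))),
         ch || !(newOf d0.keys l).isEmpty) := by
  intro l
  induction l with
  | nil => intro d0 ch; simp [newOf, dict_mk_items]
  | cons nb l ih =>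
    intro d0 ch
    by_cases hnb : nb ∈ d0.keys
    · have hc : d0.contains nb = true := (PySem.Dict.contains_iff_mem_keys d0 nb).mpr hnb
      simp only [List.foldl_cons, hc, if_true]
      rw [ih d0 ch]
      simp [newOf, hnb]
    · have hc : d0.contains nb = false := by
        have h1 : ¬ d0.contains nb = true := fun h => hnb ((PySem.Dict.contains_iff_mem_keys d0 nb).mp h)
        simpa using h1
      have hitems1 : (d0.insert nb (dv + 1)).items = d0.items ++ [(nb, dv + 1)] :=
        PySem.Dict.items_insert_of_not_contains d0 _ hc
      have hkeys1 : (d0.insert nb (dv + 1)).keys = d0.keys ++ [nb] := by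
        simp [PySem.Dict.keys, hitems1]
      simp only [List.foldl_cons, hc, Bool.false_eq_true, if_false]
      rw [ih (d0.insert nb (dv + 1)) true]
      rw [hitems1, hkeys1]
      simp [newOf, hnb, List.append_assoc]

theorem bInnerNoop (dv : Int) :
    ∀ (l : List Int) (d0 : PySem.Dict Int Int) (ch : Bool),
    (∀ nb ∈ l, d0.contains nb = true) →
    l.foldl (fun st nb => if st.1.contains nb then st else (st.1.insert nb (dv + 1), true)) (d0, ch)
      = (d0, ch) := by
  intro l d0 ch h
  have hsub : ∀ x ∈ l, x ∈ d0.keys :=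
    fun x hx => (PySem.Dict.contains_iff_mem_keys d0 x).mp (h x hx)
  rw [bInner dv l d0 ch, newOf_nil_of_subset l d0.keys hsub]
  simp [dict_mk_items]

theorem bNoop (f : List (List Int)) :
    ∀ (pre : List (Int × Int)) (d0 : PySem.Dict Int Int) (ch : Bool),
    (∀ p ∈ pre, ∀ nb ∈ pvNbr f p.1, d0.contains nb = true) →
    pre.foldl (bRelax f) (d0, ch) = (d0, ch) := by
  intro pre
  induction pre with
  | nil => intro d0 ch _; rfl
  | cons p pre ih =>
    intro d0 ch h
    have h1 : bRelax f (d0, ch) p = (d0, ch) := by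
      simp only [bRelax]
      exact bInnerNoop p.2 (pvNbr f p.1) d0 ch (h p (by simp))
    rw [List.foldl_cons, h1]
    exact ih d0 ch fun q hq => h q (by simp [hq])

theorem not_isEmpty_append {α : Type} (a b : List α) :
    (!(a ++ b).isEmpty) = (!a.isEmpty || !b.isEmpty) := by
  cases a <;> simp

theorem bSeg (f : List (List Int)) (dv : Int) :
    ∀ (F : List Int) (d0 : PySem.Dict Int Int) (ch : Bool),
    (F.map (fun u => (u, dv))).foldl (bRelax f) (d0, ch)
      = (PySem.Dict.mk (d0.items ++ (newOf d0.keys (F.flatMap (pvNbr f))).map (fun u => (u, dv + 1))),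
         ch || !(newOf d0.keys (F.flatMap (pvNbr f))).isEmpty) := by
  intro F
  induction F with
  | nil => intro d0 ch; simp [newOf, dict_mk_items]
  | cons u F ih =>
    intro d0 ch
    have h1 : bRelax f (d0, ch) (u, dv)
        = (PySem.Dict.mk (d0.items ++ (newOf d0.keys (pvNbr f u)).map (fun x => (x, dv + 1))),
           ch || !(newOf d0.keys (pvNbr f u)).isEmpty) := by
      simp only [bRelax]
      exact bInner dv (pvNbr f u) d0 ch
    have hkeys1 : (PySem.Dict.mk (d0.items ++ (newOf d0.keys (pvNbr f u)).map (fun x => (x, dv + 1)))).keys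
        = d0.keys ++ newOf d0.keys (pvNbr f u) := by
      simp [PySem.Dict.keys, List.map_map, Function.comp_def]
    rw [List.map_cons, List.foldl_cons, h1, ih _ (ch || !(newOf d0.keys (pvNbr f u)).isEmpty)]
    rw [hkeys1]
    have hsplit : newOf d0.keys ((u :: F).flatMap (pvNbr f))
        = newOf d0.keys (pvNbr f u)
          ++ newOf (d0.keys ++ newOf d0.keys (pvNbr f u)) (F.flatMap (pvNbr f)) := by
      rw [List.flatMap_cons, newOf_append]
    rw [hsplit]
    simp [List.append_assoc, Bool.or_assoc, not_isEmpty_append]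

theorem bRound_eq (f : List (List Int)) (d0 : PySem.Dict Int Int) (pre : List (Int × Int))
    (F : List Int) (dv : Int)
    (hitems : d0.items = pre ++ F.map (fun u => (u, dv)))
    (hpre : ∀ p ∈ pre, ∀ nb ∈ pvNbr f p.1, d0.contains nb = true) :
    bRound f d0
      = (PySem.Dict.mk (d0.items ++ (newOf d0.keys (F.flatMap (pvNbr f))).map (fun u => (u, dv + 1))),
         !(newOf d0.keys (F.flatMap (pvNbr f))).isEmpty) := by
  have h1 : bRound f d0 = (pre ++ F.map (fun u => (u, dv))).foldl (bRelax f) (d0, false) := by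
    unfold bRound
    rw [hitems]
  rw [h1, List.foldl_append, bNoop f pre d0 false hpre, bSeg f dv F d0 false]
  simp

theorem bLoop_videos (w : List (List String)) (f : List (List Int)) (level : Int) :
    ∀ (n k : Nat) (d0 : PySem.Dict Int Int) (pre : List (Int × Int)) (F : List Int),
    (level - k).toNat = n → (k : Int) ≤ level →
    d0.items = pre ++ F.map (fun u => (u, (k : Int))) →
    d0.keys.Nodup →
    (∀ p ∈ pre, ∀ nb ∈ pvNbr f p.1, d0.contains nb = true) →
    (∀ p ∈ pre, p.2 < (k : Int)) →
    ((bLoop f level n (k : Int) d0).items.flatMap (fun p => if p.2 = level then pvWat w p.1 else []))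
      = (pvIter f n (d0.keys, F)).2.flatMap (pvWat w) := by
  intro n
  induction n with
  | zero =>
    intro k d0 pre F hn hk hitems _ _ hval
    have hkl : (k : Int) = level := by omega
    simp only [bLoop, pvIter]
    rw [hitems, List.flatMap_append]
    have hpre0 : pre.flatMap (fun p => if p.2 = level then pvWat w p.1 else []) = [] := by
      rw [List.flatMap_eq_nil_iff]
      intro p hp
      rw [if_neg (by have := hval p hp; omega)]
    have hF0 : (F.map (fun u => (u, (k : Int)))).flatMap (fun p => if p.2 = level then pvWat w p.1 else [])
        = F.flatMap (pvWat w) := by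
      rw [List.flatMap_map]
      simp [hkl]
    rw [hpre0, hF0]
    simp
  | succ n ih =>
    intro k d0 pre F hn hk hitems hnodup hpre hval
    have hklt : (k : Int) < level := by omega
    simp only [bLoop]
    rw [if_pos hklt]
    rw [bRound_eq f d0 pre F (k : Int) hitems hpre]
    by_cases hFe : newOf d0.keys (F.flatMap (pvNbr f)) = []
    · rw [hFe]
      simp only [List.isEmpty_nil, Bool.not_true, Bool.false_eq_true, if_false,
        List.map_nil, List.append_nil, dict_mk_items]
      have hL : d0.items.flatMap (fun p => if p.2 = level then pvWat w p.1 else []) = [] := by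
        rw [List.flatMap_eq_nil_iff]
        intro p hp
        rw [hitems] at hp
        rcases List.mem_append.mp hp with hp | hp
        · rw [if_neg (by have := hval p hp; omega)]
        · obtain ⟨u, _, rfl⟩ := List.mem_map.mp hp
          rw [if_neg (by simpa using (by omega : ¬ (k : Int) = level))]
      rw [hL]
      have h2 : (pvIter f (n + 1) (d0.keys, F)).2 = [] := by
        show (pvIter f n (pvStep f (d0.keys, F))).2 = []
        simp only [pvStep, hFe]
        exact pvIter_nil f n _
      rw [h2]
      rfl
    · have hch : (!(newOf d0.keys (F.flatMap (pvNbr f))).isEmpty) = true := by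
        simp [hFe]
      rw [hch]
      simp only [if_true]
      set F' := newOf d0.keys (F.flatMap (pvNbr f)) with hF'
      set d1 := PySem.Dict.mk (d0.items ++ F'.map (fun u => (u, (k : Int) + 1))) with hd1
      have hd1items : d1.items = d0.items ++ F'.map (fun u => (u, ((k + 1 : Nat) : Int))) := by
        rw [hd1]; push_cast; rfl
      have hd1keys : d1.keys = d0.keys ++ F' := by
        rw [hd1]
        show (d0.items ++ F'.map (fun u => (u, (k : Int) + 1))).map (fun p => p.1) = d0.keys ++ F'
        simp [PySem.Dict.keys, List.map_map, Function.comp_def]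
      have hnew := newOf_nodup_notmem (F.flatMap (pvNbr f)) d0.keys
      rw [← hF'] at hnew
      have hd1nodup : d1.keys.Nodup := by
        rw [hd1keys]
        refine List.Nodup.append hnodup hnew.1 ?_
        intro a ha hmem
        exact hnew.2 a hmem ha
      have hpre1 : ∀ p ∈ d0.items, ∀ nb ∈ pvNbr f p.1, d1.contains nb = true := by
        intro p hp nb hnb
        apply (PySem.Dict.contains_iff_mem_keys d1 nb).mpr
        rw [hd1keys]
        rw [hitems] at hp
        rcases List.mem_append.mp hp with hp | hp
        · have := (PySem.Dict.contains_iff_mem_keys d0 nb).mp (hpre p hp nb hnb)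
          exact List.mem_append.mpr (Or.inl this)
        · obtain ⟨u, hu, rfl⟩ := List.mem_map.mp hp
          have hq : nb ∈ F.flatMap (pvNbr f) := List.mem_flatMap.mpr ⟨u, hu, hnb⟩
          rcases mem_newOf (F.flatMap (pvNbr f)) d0.keys nb hq with h | h
          · exact List.mem_append.mpr (Or.inl h)
          · rw [← hF'] at h
            exact List.mem_append.mpr (Or.inr h)
      have hval1 : ∀ p ∈ d0.items, p.2 < ((k + 1 : Nat) : Int) := by
        intro p hp
        rw [hitems] at hp
        rcases List.mem_append.mp hp with hp | hp
        · have := hval p hp; push_cast; omega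
        · obtain ⟨u, _, rfl⟩ := List.mem_map.mp hp
          push_cast; omega
      have hmain := ih (k + 1) d1 d0.items F' (by push_cast; omega) (by push_cast; omega)
        hd1items hd1nodup hpre1 hval1
      rw [show ((k + 1 : Nat) : Int) = (k : Int) + 1 by push_cast; ring] at hmain
      rw [hmain, hd1keys]
      rfl

-- ---------- the counting tails agree ----------

-- adjacent run-length grouping (left to right) and its merge step
def mergeGrp (c : Int) (v : String) : List (Int × String) → List (Int × String)
  | (c', y) :: rest => if y = v then (c + c', v) :: rest else (c, v) :: (c', y) :: rest
  | [] => [(c, v)]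

def grp : List String → List (Int × String)
  | [] => []
  | v :: S => mergeGrp 1 v (grp S)

theorem mergeGrp_self (c : Int) (v : String) (gs : List (Int × String)) :
    mergeGrp c v (mergeGrp 1 v gs) = mergeGrp (c + 1) v gs := by
  match gs with
  | [] => simp [mergeGrp]
  | (c', y) :: rest =>
    by_cases hy : y = v
    · simp only [mergeGrp, hy, if_true, if_pos rfl]
      ring_nf
    · simp [mergeGrp, hy]

theorem mergeGrp_ne (c : Int) (v x : String) (gs : List (Int × String)) (h : x ≠ v) :
    mergeGrp c v (mergeGrp 1 x gs) = (c, v) :: mergeGrp 1 x gs := by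
  match gs with
  | [] => simp [mergeGrp, h]
  | (c', y) :: rest =>
    by_cases hy : y = x
    · simp [mergeGrp, hy, h]
    · simp [mergeGrp, hy, h]

theorem foldl_bRunStep_acc : ∀ (S : List String) (c : Int) (v : String) (acc : List (Int × String)),
    S.foldl bRunStep ((c, v) :: acc) = (mergeGrp c v (grp S)).reverse ++ acc := by
  intro S
  induction S with
  | nil => intro c v acc; simp [grp, mergeGrp]
  | cons x S ih =>
    intro c v acc
    rw [List.foldl_cons]
    by_cases hvx : v = x
    · subst hvx
      rw [show bRunStep ((c, v) :: acc) v = (c + 1, v) :: acc from by simp [bRunStep]]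
      rw [ih (c + 1) v acc]
      rw [show grp (v :: S) = mergeGrp 1 v (grp S) from rfl, mergeGrp_self]
    · rw [show bRunStep ((c, v) :: acc) x = (1, x) :: (c, v) :: acc from by simp [bRunStep, hvx]]
      rw [ih 1 x ((c, v) :: acc)]
      rw [show grp (x :: S) = mergeGrp 1 x (grp S) from rfl, mergeGrp_ne c v x (grp S) (Ne.symm hvx)]
      simp

theorem foldl_bRunStep_nil (S : List String) : S.foldl bRunStep [] = (grp S).reverse := by
  match S with
  | [] => rfl
  | x :: S =>
    rw [List.foldl_cons, show bRunStep [] x = [(1, x)] from rfl, foldl_bRunStep_acc S 1 x []]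
    simp [grp]

-- adjacent dedup (= the distinct elements, in order, when the input is sorted)
def sdedup : List String → List String
  | [] => []
  | x :: S =>
    match sdedup S with
    | y :: t => if x = y then y :: t else x :: y :: t
    | [] => [x]

theorem sdedup_eq_nil : ∀ (S : List String), sdedup S = [] ↔ S = [] := by
  intro S
  match S with
  | [] => simp [sdedup]
  | x :: S =>
    simp only [sdedup]
    constructor
    · intro h
      exfalso
      match hS : sdedup S with
      | [] => rw [hS] at h; simp at h
      | y :: t => rw [hS] at h; by_cases hxy : x = y <;> simp [hxy] at h
    · intro h; simp at h

theorem mem_sdedup : ∀ (S : List String) (x : String), x ∈ sdedup S ↔ x ∈ S := by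
  intro S
  induction S with
  | nil => intro x; simp [sdedup]
  | cons a S ih =>
    intro x
    match hS : sdedup S with
    | [] =>
      have hS0 : S = [] := (sdedup_eq_nil S).mp hS
      subst hS0
      simp [sdedup]
    | y :: t =>
      have hsd : sdedup (a :: S) = if a = y then y :: t else a :: y :: t := by
        simp only [sdedup, hS]
      rw [hsd]
      have hmem : ∀ z, z ∈ y :: t ↔ z ∈ S := by
        intro z; rw [← hS]; exact ih z
      by_cases hay : a = y
      · rw [if_pos hay]
        rw [hmem x, List.mem_cons]
        constructor
        · intro h; exact Or.inr h
        · rintro (rfl | h)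
          · subst hay; exact (hmem x).mp (by simp)
          · exact h
      · rw [if_neg hay]
        simp only [List.mem_cons]
        rw [show (x = y ∨ x ∈ t) ↔ x ∈ y :: t from by simp, hmem x]

theorem sdedup_pairwise_lt : ∀ (S : List String), S.Pairwise (· ≤ ·) → (sdedup S).Pairwise (· < ·) := by
  intro S
  induction S with
  | nil => intro _; simp [sdedup]
  | cons a S ih =>
    intro hp
    obtain ⟨ha, hS⟩ := List.pairwise_cons.mp hp
    have ihS := ih hS
    match hS2 : sdedup S with
    | [] =>
      have hS0 : S = [] := (sdedup_eq_nil S).mp hS2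
      subst hS0
      simp [sdedup]
    | y :: t =>
      have hsd : sdedup (a :: S) = if a = y then y :: t else a :: y :: t := by
        simp only [sdedup, hS2]
      rw [hsd]
      rw [hS2] at ihS
      by_cases hay : a = y
      · rw [if_pos hay]; exact ihS
      · rw [if_neg hay]
        refine List.pairwise_cons.mpr ⟨?_, ihS⟩
        intro z hz
        have hyS : y ∈ S := (mem_sdedup S y).mp (by rw [hS2]; simp)
        have hay' : a < y := lt_of_le_of_ne (ha y hyS) hay
        rcases List.mem_cons.mp hz with rfl | hz
        · exact hay'
        · exact lt_trans hay' ((List.pairwise_cons.mp ihS).1 z hz)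

theorem grp_eq : ∀ (S : List String), S.Pairwise (· ≤ ·) →
    grp S = (sdedup S).map (fun k => ((S.count k : Int), k)) := by
  intro S
  induction S with
  | nil => intro _; rfl
  | cons a S ih =>
    intro hp
    obtain ⟨ha, hS⟩ := List.pairwise_cons.mp hp
    have ihS := ih hS
    show mergeGrp 1 a (grp S) = (sdedup (a :: S)).map (fun k => (((a :: S).count k : Int), k))
    match hS2 : sdedup S with
    | [] =>
      have hS0 : S = [] := (sdedup_eq_nil S).mp hS2
      subst hS0
      simp [grp, mergeGrp, sdedup, List.count_cons]
    | y :: t =>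
      rw [hS2] at ihS
      have hlt := sdedup_pairwise_lt S hS
      rw [hS2] at hlt
      have hyS : y ∈ S := (mem_sdedup S y).mp (by rw [hS2]; simp)
      have hmemS : ∀ z, z ∈ y :: t → z ∈ S := by
        intro z hz; exact (mem_sdedup S z).mp (by rw [hS2]; exact hz)
      rw [ihS, List.map_cons]
      have hsd : sdedup (a :: S) = if a = y then y :: t else a :: y :: t := by
        simp only [sdedup, hS2]
      by_cases hay : a = y
      · rw [hsd, if_pos hay]
        subst hay
        simp only [mergeGrp, if_pos rfl, List.map_cons]
        have hcnt : ((a :: S).count a : Int) = 1 + (S.count a : Int) := by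
          rw [List.count_cons_self]; push_cast; ring
        have htail : t.map (fun k => (((a :: S).count k : Int), k)) = t.map (fun k => ((S.count k : Int), k)) := by
          apply List.map_congr_left
          intro k hk
          have hka : k ≠ a := by
            intro hkk
            subst hkk
            exact absurd ((List.pairwise_cons.mp hlt).1 k hk) (lt_irrefl k)
          simp [List.count_cons, hka, Ne.symm hka]
        rw [hcnt, htail]
        simp
      · rw [hsd, if_neg hay]
        have hanotS : a ∉ S := by
          intro haS
          have : a ∈ y :: t := by rw [← hS2]; exact (mem_sdedup S a).mpr haS
          rcases List.mem_cons.mp this with h | h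
          · exact hay h
          · exact absurd (ha y hyS) (not_le.mpr ((List.pairwise_cons.mp hlt).1 a h))
        have hca : (a :: S).count a = 1 := by
          rw [List.count_cons_self, List.count_eq_zero.mpr hanotS]
        have htail : (y :: t).map (fun k => (((a :: S).count k : Int), k)) = (y :: t).map (fun k => ((S.count k : Int), k)) := by
          apply List.map_congr_left
          intro k hk
          have hka : k ≠ a := by
            intro hkk; subst hkk; exact hanotS (hmemS k hk)
          simp [List.count_cons, hka, Ne.symm hka]
        have hmg : mergeGrp 1 a (((S.count y : Int), y) :: t.map (fun k => ((S.count k : Int), k)))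
            = (1, a) :: ((S.count y : Int), y) :: t.map (fun k => ((S.count k : Int), k)) := by
          simp only [mergeGrp]
          rw [if_neg (fun h => hay h.symm)]
        rw [hmg, List.map_cons, htail, hca]
        push_cast
        simp

theorem insertBy_pairwise {α : Type} {R : α → α → Prop} (before : α → α → Bool)
    (htrans : ∀ a b c, R a b → R b c → R a c)
    (ht : ∀ a b, before a b = true → R a b) (hf : ∀ a b, before a b = false → R b a) :
    ∀ (ys : List α) (x : α), ys.Pairwise R → (PySem.List.insertBy before x ys).Pairwise R := by
  intro ys
  induction ys with
  | nil => intro x _; simp [PySem.List.insertBy]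
  | cons y ys ih =>
    intro x hp
    obtain ⟨hy, hys⟩ := List.pairwise_cons.mp hp
    by_cases hb : before x y = true
    · rw [show PySem.List.insertBy before x (y :: ys) = x :: y :: ys from by
        simp [PySem.List.insertBy, hb]]
      refine List.pairwise_cons.mpr ⟨?_, hp⟩
      intro z hz
      rcases List.mem_cons.mp hz with rfl | hz
      · exact ht x z hb
      · exact htrans x y z (ht x y hb) (hy z hz)
    · have hb' : before x y = false := by simpa using hb
      rw [show PySem.List.insertBy before x (y :: ys) = y :: PySem.List.insertBy before x ys from by
        simp [PySem.List.insertBy, hb']]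
      refine List.pairwise_cons.mpr ⟨?_, ih x hys⟩
      intro z hz
      rw [PySem.List.mem_insertBy] at hz
      rcases hz with rfl | hz
      · exact hf z y hb'
      · exact hy z hz

theorem foldl_insertBy_pairwise {α : Type} {R : α → α → Prop} (before : α → α → Bool)
    (htrans : ∀ a b c, R a b → R b c → R a c)
    (ht : ∀ a b, before a b = true → R a b) (hf : ∀ a b, before a b = false → R b a) :
    ∀ (xs acc : List α), acc.Pairwise R →
    (xs.foldl (fun acc x => PySem.List.insertBy before x acc) acc).Pairwise R := by
  intro xs
  induction xs with
  | nil => intro acc h; exact h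
  | cons x xs ih =>
    intro acc h
    rw [List.foldl_cons]
    exact ih _ (insertBy_pairwise before htrans ht hf acc x h)

theorem sorted2_pairwise_lex {α κ₁ κ₂ : Type} [LinearOrder κ₁] [LinearOrder κ₂]
    (xs : List α) (k1 : α → κ₁) (k2 : α → κ₂) :
    (PySem.List.sorted2 xs k1 k2).Pairwise (fun a b => k1 a < k1 b ∨ (k1 a = k1 b ∧ k2 a ≤ k2 b)) := by
  simp only [PySem.List.sorted2]
  apply foldl_insertBy_pairwise
  · intro a b c hab hbc
    rcases hab with h1 | ⟨h1, h2⟩ <;> rcases hbc with h3 | ⟨h3, h4⟩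
    · exact Or.inl (lt_trans h1 h3)
    · exact Or.inl (by rw [← h3]; exact h1)
    · exact Or.inl (by rw [h1]; exact h3)
    · exact Or.inr ⟨h1.trans h3, le_trans h2 h4⟩
  · intro a b h
    by_cases h1 : k1 a < k1 b
    · exact Or.inl h1
    · have h2 : ¬ k1 b < k1 a ∧ k2 a < k2 b := by simpa [h1] using h
      rcases lt_or_eq_of_le (not_lt.mp h2.1) with h3 | h3
      · exact Or.inl h3
      · exact Or.inr ⟨h3, le_of_lt h2.2⟩
  · intro a b h
    by_cases h1 : k1 a < k1 b
    · simp [h1] at h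
    · by_cases h3 : k1 b < k1 a
      · exact Or.inl h3
      · have heq : k1 b = k1 a := le_antisymm (not_lt.mp h1) (not_lt.mp h3)
        have h4 : ¬ k2 a < k2 b := by simpa [h1, h3] using h
        exact Or.inr ⟨heq, not_lt.mp h4⟩
  · exact List.Pairwise.nil

theorem tail_eq (L : List String) :
    (PySem.List.sorted2 (PySem.Dict.counter L).items (fun x => x.2) (fun x => x.1)).map (fun x => x.1)
      = (PySem.List.sorted2 (((PySem.List.sorted L (fun x => x) false).foldl bRunStep []).reverse)
          (fun x => x.1) (fun x => x.2)).map (fun x => x.2) := by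
  rw [foldl_bRunStep_nil, List.reverse_reverse]
  have hpS : (PySem.List.sorted L (fun x => x) false).Pairwise (· ≤ ·) := by
    simpa using PySem.List.sorted_pairwise L (fun x => x)
  rw [grp_eq _ hpS]
  set S := PySem.List.sorted L (fun x => x) false with hSdef
  have hcnt : ∀ k : String, S.count k = L.count k :=
    fun k => (PySem.List.sorted_perm L (fun x => x) false).count_eq k
  have hmapc : (sdedup S).map (fun k => ((S.count k : Int), k))
      = (sdedup S).map (fun k => ((L.count k : Int), k)) := by
    apply List.map_congr_left
    intro k _
    rw [hcnt k]
  rw [hmapc]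
  have hnd1 : (sdedup S).Nodup := (sdedup_pairwise_lt S hpS).imp (fun h => ne_of_lt h)
  have hnd2 : (PySem.Set.ofList L : List String).Nodup := PySem.Set.nodup_ofList L
  have hmem : ∀ a : String, a ∈ sdedup S ↔ a ∈ (PySem.Set.ofList L : List String) := by
    intro a
    rw [mem_sdedup, PySem.Set.mem_ofList]
    exact PySem.List.mem_sorted L (fun x => x) false a
  have hperm1 : (sdedup S).Perm (PySem.Set.ofList L : List String) :=
    (List.perm_ext_iff_of_nodup hnd1 hnd2).mpr hmem
  have hperm2 : ((sdedup S).map (fun k => ((L.count k : Int), k))).Perm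
      ((PySem.Set.ofList L : List String).map (fun k => ((L.count k : Int), k))) := hperm1.map _
  have hitems : ((PySem.Dict.counter L).items.map (fun p => (p.2, p.1)))
      = (PySem.Set.ofList L : List String).map (fun k => ((L.count k : Int), k)) := by
    rw [PySem.Dict.items_counter, List.map_map]
    rfl
  set X := PySem.List.sorted2 (PySem.Dict.counter L).items (fun x => x.2) (fun x => x.1) with hX
  set Y := PySem.List.sorted2 ((sdedup S).map (fun k => ((L.count k : Int), k)))
    (fun x => x.1) (fun x => x.2) with hY
  have hXY : X.map (fun p => (p.2, p.1)) = Y := by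
    apply List.eq_of_perm_of_sorted
      (le := fun a b : Int × String => a.1 < b.1 ∨ (a.1 = b.1 ∧ a.2 ≤ b.2))
    · intro a b _ _ hab hba
      rcases hab with h1 | ⟨h1, h2⟩ <;> rcases hba with h3 | ⟨h3, h4⟩
      · exact absurd h3 (lt_asymm h1)
      · exact absurd h3 (ne_of_gt h1)
      · exact absurd h1 (ne_of_gt h3)
      · obtain ⟨a1, a2⟩ := a
        obtain ⟨b1, b2⟩ := b
        simp only at h1 h2 h4
        rw [h1, le_antisymm h2 h4]
    · rw [List.pairwise_map]
      have h := sorted2_pairwise_lex (PySem.Dict.counter L).items (fun x => x.2) (fun x => x.1)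
      rw [← hX] at h
      exact h
    · exact sorted2_pairwise_lex _ _ _
    · have p1 : (X.map (fun p => (p.2, p.1))).Perm
          ((PySem.Dict.counter L).items.map (fun p => (p.2, p.1))) :=
        (PySem.List.sorted2_perm (PySem.Dict.counter L).items (fun x => x.2) (fun x => x.1) false).map _
      have p2 := hperm2.symm
      have p3 : ((sdedup S).map (fun k => ((L.count k : Int), k))).Perm Y :=
        (PySem.List.sorted2_perm ((sdedup S).map (fun k => ((L.count k : Int), k)))
          (fun x : Int × String => x.1) (fun x : Int × String => x.2) false).symm
      exact ((p1.trans (hitems ▸ p2)).trans p3)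
  calc X.map (fun x => x.1)
      = (X.map (fun p => (p.2, p.1))).map (fun x => x.2) := by rw [List.map_map]; rfl
    _ = Y.map (fun x => x.2) := by rw [hXY]

-- ===== VERDICT (by name: the statement is the Claim_ definition above) =====
theorem watchedVideosByFriends_spec : Claim_equal_watchedVideosByFriends := by
  intro w f id level _ _
  simp only [Spec_watchedVideosByFriends, watchedVideosByFriends, watchedVideosByFriends_alt]
  rw [show (PySem.Set.empty : PySem.Set Int) = ([] : List Int) from rfl]
  have hd0c : (PySem.Dict.empty : PySem.Dict Int Int).contains id = false := by simp
  have hd0items : (PySem.Dict.empty.insert id (0 : Int)).items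
      = [] ++ [id].map (fun u => (u, ((0 : Nat) : Int))) := by
    rw [PySem.Dict.items_insert_of_not_contains _ _ hd0c]
    simp [show (PySem.Dict.empty : PySem.Dict Int Int).items = ([] : List (Int × Int)) from rfl]
  have hd0keys : (PySem.Dict.empty.insert id (0 : Int)).keys = [id] := by
    simp [PySem.Dict.keys, PySem.Dict.items_insert_of_not_contains _ _ hd0c,
      show (PySem.Dict.empty : PySem.Dict Int Int).items = ([] : List (Int × Int)) from rfl]
  by_cases hlev : 0 ≤ level
  · have hfuel : (max level 0 + 1).toNat = level.toNat + 1 := by omega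
    rw [hfuel]
    have hA := aLoop_eq w f level level.toNat 0 [id] [] hlev (by omega)
    simp only [show newOf [] [id] = [id] from by simp [newOf], List.nil_append] at hA
    rw [hA]
    have hB := bLoop_videos w f level level.toNat 0 (PySem.Dict.empty.insert id 0) [] [id]
      (by simp) (by simpa using hlev) hd0items (by rw [hd0keys]; simp) (by simp) (by simp)
    rw [hd0keys] at hB
    simp only [Nat.cast_zero] at hB
    rw [hB]
    exact tail_eq _
  · have hfuel : (max level 0 + 1).toNat = 1 := by omega
    have htn : level.toNat = 0 := by omega
    rw [hfuel, htn]
    have hAneg : aLoop w f level 1 0 [id] [] PySem.Dict.empty = PySem.Dict.empty := by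
      rw [aLoop, if_neg (by simp)]
      simp only
      rw [if_pos (by omega), aRound_expand w f 0 level (by omega) [id] [] [] PySem.Dict.empty]
    rw [hAneg]
    simp only [bLoop]
    have hv : (PySem.Dict.empty.insert id (0 : Int)).items.flatMap
        (fun p => if p.2 = level then pvWat w p.1 else []) = [] := by
      rw [PySem.Dict.items_insert_of_not_contains _ _ hd0c]
      simp [show (PySem.Dict.empty : PySem.Dict Int Int).items = ([] : List (Int × Int)) from rfl,
        show ¬ ((0 : Int) = level) by omega]
    rw [hv]
    rfl
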